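-- pv_equiv track=rewrite | github.com/GuoYibo233/self-ensemble | plot/test_visualization.py | create_segment_positions
-- ===== SOURCE A (Python) =====
-- def create_segment_positions(config):
--     """
--     根据配置创建分段位置
--     Create segment positions based on configuration
--     """
--     segment_positions = []
--     current_pos = 0
--
--     for i in range(config['num_paraphrases']):
--         if i > 0:
--             current_pos += config['separator_tokens']
--
--         start = current_pos
--         end = current_pos + config['tokens_per_paraphrase']
--         segment_positions.append((start, end))
--         current_pos = end
--
--     original_length = current_pos
--     total_length = original_length + config['num_generated_tokens']
--
--     return segment_positions, original_length, total_length
-- ===== SOURCE B (Python) =====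
-- def create_segment_positions(config):
--     n = config['num_paraphrases']
--     g = config['num_generated_tokens']
--     if n <= 0:
--         return [], 0, g
--     t = config['tokens_per_paraphrase']
--     stride = t + (config['separator_tokens'] if n > 1 else 0)
--     segment_positions = [(i * stride, i * stride + t) for i in range(n)]
--     original_length = (n - 1) * stride + t
--     return segment_positions, original_length, original_length + g
-- ===== Notes on version B (the rewrite author's own statement) =====
-- stated objective: simpler
-- what changed: Replaces the running current_pos accumulator loop by per-index closed-form arithmetic: each segment is (i*stride, i*stride+tokens) for stride = tokens + separator, and original_length is (n-1)*stride + tokens.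
import Mathlib
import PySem

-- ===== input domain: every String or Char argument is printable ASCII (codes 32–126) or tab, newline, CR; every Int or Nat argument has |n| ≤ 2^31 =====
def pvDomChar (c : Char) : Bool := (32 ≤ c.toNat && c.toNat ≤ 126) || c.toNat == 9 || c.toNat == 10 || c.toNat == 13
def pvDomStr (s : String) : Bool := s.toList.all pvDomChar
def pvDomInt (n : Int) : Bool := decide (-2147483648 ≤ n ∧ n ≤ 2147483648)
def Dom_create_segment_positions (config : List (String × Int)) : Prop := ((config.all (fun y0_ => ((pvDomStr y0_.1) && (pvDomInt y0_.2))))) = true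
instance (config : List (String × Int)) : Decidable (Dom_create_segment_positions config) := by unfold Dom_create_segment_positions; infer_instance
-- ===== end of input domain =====

-- B replaces A's running current_pos accumulator by closed-form per-index arithmetic (objective: simpler).

-- ===== PORT A =====
-- A's loop: for i in range(n): if i>0: pos += sep; start=pos; end=pos+t; append; pos=end
def csp_loopA (sep t : Int) (idxs : List Int) (segs : List (Int × Int)) (pos : Int) :
    (List (Int × Int)) × Int :=
  match idxs with
  | [] => (segs, pos)
  | i :: rest =>
      let pos := if i > 0 then pos + sep else pos
      let start := pos
      let e := pos + t
      csp_loopA sep t rest (segs ++ [(start, e)]) e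

def create_segment_positions (config : List (String × Int)) : (List (Int × Int)) × Int × Int :=
  -- dict lookups; Pre_ excludes KeyError (a missing required key), so the .getD 0 defaults are never used where the value matters
  let n := (config.lookup "num_paraphrases").getD 0
  let sep := (config.lookup "separator_tokens").getD 0
  let t := (config.lookup "tokens_per_paraphrase").getD 0
  let g := (config.lookup "num_generated_tokens").getD 0
  let r := csp_loopA sep t (PySem.List.pyRange 0 n 1) [] 0
  (r.1, r.2, r.2 + g)

-- ===== PORT B =====
def create_segment_positions_alt (config : List (String × Int)) : (List (Int × Int)) × Int × Int :=
  let n := (config.lookup "num_paraphrases").getD 0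
  let g := (config.lookup "num_generated_tokens").getD 0
  if n ≤ 0 then ([], 0, g)
  else
    let t := (config.lookup "tokens_per_paraphrase").getD 0
    let stride := t + (if n > 1 then (config.lookup "separator_tokens").getD 0 else 0)
    let segs := (PySem.List.pyRange 0 n 1).map (fun i => (i * stride, i * stride + t))
    let orig := (n - 1) * stride + t
    (segs, orig, orig + g)

-- ===== PRECONDITION & SPEC =====
-- Pre_ excludes exactly the KeyErrors: both programs require the same keys
-- ('num_paraphrases' and 'num_generated_tokens' always; 'tokens_per_paraphrase' when n ≥ 1;
-- 'separator_tokens' when n ≥ 2).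
def Pre_create_segment_positions (config : List (String × Int)) : Prop :=
  (config.lookup "num_paraphrases").isSome = true ∧
  (config.lookup "num_generated_tokens").isSome = true ∧
  (1 ≤ (config.lookup "num_paraphrases").getD 0 →
    (config.lookup "tokens_per_paraphrase").isSome = true) ∧
  (2 ≤ (config.lookup "num_paraphrases").getD 0 →
    (config.lookup "separator_tokens").isSome = true)
instance (config : List (String × Int)) : Decidable (Pre_create_segment_positions config) := by
  unfold Pre_create_segment_positions; infer_instance

def pvWitness_create_segment_positions : (List (String × Int)) :=
  [("num_paraphrases", 3), ("separator_tokens", 2), ("tokens_per_paraphrase", 5),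
   ("num_generated_tokens", 4)]

def Spec_create_segment_positions (config : List (String × Int)) (out : (List (Int × Int)) × Int × Int) : Prop := out = create_segment_positions_alt config
instance (config : List (String × Int)) (out : (List (Int × Int)) × Int × Int) : Decidable (Spec_create_segment_positions config out) := by unfold Spec_create_segment_positions; infer_instance

-- ===== CLAIM (what is proved, stated in full; the proofs are below) =====
def Claim_equal_create_segment_positions : Prop := ∀ (config : List (String × Int)), Dom_create_segment_positions config → Pre_create_segment_positions config → Spec_create_segment_positions config (create_segment_positions config)

-- ===== LEMMAS AND PROOFS =====

theorem csp_loopA_append (sep t : Int) (xs ys : List Int) (segs : List (Int × Int)) (pos : Int) :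
    csp_loopA sep t (xs ++ ys) segs pos =
      csp_loopA sep t ys (csp_loopA sep t xs segs pos).1 (csp_loopA sep t xs segs pos).2 := by
  induction xs generalizing segs pos with
  | nil => simp [csp_loopA]
  | cons i rest ih => simp [csp_loopA, ih]

-- invariant: after processing indices 0..k-1 (k ≥ 1) the loop state is exactly B's closed form
theorem csp_loopA_closed (sep t : Int) (k : Nat) (hk : 1 ≤ k) :
    csp_loopA sep t (PySem.List.pyRange 0 (k : Int) 1) [] 0 =
      ((PySem.List.pyRange 0 (k : Int) 1).map
        (fun i => (i * (t + sep), i * (t + sep) + t)),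
       ((k : Int) - 1) * (t + sep) + t) := by
  induction k with
  | zero => omega
  | succ m ih =>
      by_cases hm : 1 ≤ m
      · have hle : (0 : Int) ≤ (m : Int) := by positivity
        have hsplit : PySem.List.pyRange 0 ((m : Int) + 1) 1
            = PySem.List.pyRange 0 (m : Int) 1 ++ [(m : Int)] :=
          PySem.List.pyRange_one_succ_right hle
        have hm' : ((m : Int)) > 0 := by exact_mod_cast hm
        push_cast
        rw [hsplit, csp_loopA_append, ih hm, List.map_append]
        simp only [csp_loopA, List.map_cons, List.map_nil, if_pos hm']
        simp only [Prod.mk.injEq, List.append_cancel_left_eq, List.cons.injEq, and_true]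
        refine ⟨⟨by ring, by ring⟩, by ring⟩
      · have hm0 : m = 0 := by omega
        subst hm0
        have : PySem.List.pyRange 0 ((0 : Nat) + 1 : Int) 1 = [0] := by
          push_cast
          exact PySem.List.pyRange_one_singleton (a := 0)
        push_cast at this ⊢
        rw [this]
        simp [csp_loopA]

-- for n ≤ 1 A never adds sep, so sep is irrelevant: with n = 1 both sides reduce to [(0, t)]
theorem create_segment_positions_eq (config : List (String × Int)) :
    create_segment_positions config = create_segment_positions_alt config := by
  simp only [create_segment_positions, create_segment_positions_alt]
  generalize (List.lookup "num_paraphrases" config).getD 0 = n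
  generalize (List.lookup "separator_tokens" config).getD 0 = sep
  generalize (List.lookup "tokens_per_paraphrase" config).getD 0 = t
  generalize (List.lookup "num_generated_tokens" config).getD 0 = g
  by_cases hle : n ≤ 0
  · rw [if_pos hle, PySem.List.pyRange_one_eq_nil hle]
    simp [csp_loopA]
  · rw [if_neg hle]
    push_cast at hle
    by_cases h1 : n > 1
    · rw [if_pos h1]
      have hk : n = ((n.toNat : Nat) : Int) := by omega
      have hk1 : 1 ≤ n.toNat := by omega
      rw [hk, csp_loopA_closed sep t n.toNat hk1]
    · rw [if_neg h1]
      have hn1 : n = 1 := by omega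
      have hsing : PySem.List.pyRange (0 : Int) 1 1 = [0] := by
        have h := PySem.List.pyRange_one_singleton (a := (0 : Int))
        norm_num at h
        exact h
      rw [hn1, hsing]
      simp [csp_loopA]

-- ===== VERDICT (by name: the statement is the Claim_ definition above) =====
theorem create_segment_positions_spec : Claim_equal_create_segment_positions := by
  intro config _ _
  unfold Spec_create_segment_positions
  exact create_segment_positions_eq config
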